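-- pv_equiv track=rewrite | github.com/miliar/Code_Jam_Webscraper | solutions_python/Problem_142/587.py | check
-- ===== SOURCE A (Python) =====
-- def check(strings):
--     lengths = list(map(len, strings))
--     ll = lengths[0]
--     for l in lengths[1:]:
--         if ll != l:
--             return False
--
--     chars = []
--     for i,string in enumerate(strings):
--         for j,t in enumerate(string):
--             if i == 0:
--                 chars.append(t[0])
--             else:
--                 if chars[j] != t[0]:
--                     return False
--     return True
-- ===== SOURCE B (Python) =====
-- def check(strings):
--     first = strings[0]
--     return set(strings) == {first}
-- ===== Notes on version B (the rewrite author's own statement) =====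
-- stated objective: idiomatic
-- what changed: Replaces the explicit length pass plus nested character-by-character comparison with a single set construction compared against the singleton of the first string.
import Mathlib
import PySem

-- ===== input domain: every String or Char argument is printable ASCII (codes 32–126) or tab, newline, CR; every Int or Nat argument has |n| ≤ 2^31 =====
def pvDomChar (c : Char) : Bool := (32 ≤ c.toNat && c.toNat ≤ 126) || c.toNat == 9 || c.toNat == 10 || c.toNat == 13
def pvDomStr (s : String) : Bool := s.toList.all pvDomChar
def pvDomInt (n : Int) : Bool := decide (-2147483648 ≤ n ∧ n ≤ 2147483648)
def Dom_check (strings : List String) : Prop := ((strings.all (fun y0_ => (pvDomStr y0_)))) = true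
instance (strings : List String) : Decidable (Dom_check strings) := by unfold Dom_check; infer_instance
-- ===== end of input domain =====

-- B replaces A's length pass + nested char comparison with a set-based all-equal test (idiomatic, not faster).

-- ===== PORT A =====
-- for l in lengths[1:]: if ll != l: return False
def checkLenLoop (ll : Int) : List Int → Bool
  | [] => true
  | l :: ls => if ll ≠ l then false else checkLenLoop ll ls

-- inner loop: for j,t in enumerate(string); chars[j] is always in range once the
-- length check passed, so pyGetD is exact here
def checkInner (i : Nat) : List Char → List Char → Nat → Option (List Char)
  | chars, [], _ => some chars
  | chars, t :: ts, j =>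
    if i = 0 then checkInner i (chars ++ [t]) ts (j + 1)
    else if PySem.List.pyGetD chars (j : Int) default ≠ t then none
    else checkInner i chars ts (j + 1)

-- outer loop: for i,string in enumerate(strings)
def checkOuter : List Char → Nat → List String → Bool
  | _, _, [] => true
  | chars, i, s :: ss =>
    match checkInner i chars s.toList 0 with
    | none => false
    | some chars' => checkOuter chars' (i + 1) ss

def check (strings : List String) : Bool :=
  match strings.map (fun s => PySem.Str.len s) with
  | [] => false  -- lengths[0] raises IndexError in Python; excluded by Pre_check
  | ll :: rest =>
    if checkLenLoop ll rest = false then false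
    else checkOuter [] 0 strings

-- ===== PORT B =====
def check_alt (strings : List String) : Bool :=
  match PySem.List.pyGet? strings 0 with
  | none => false  -- strings[0] raises IndexError in Python; excluded by Pre_check
  | some first => PySem.Set.equal (PySem.Set.ofList strings) (PySem.Set.ofList [first])

-- ===== PRECONDITION & SPEC =====
-- Both A (lengths[0]) and B (strings[0]) raise IndexError on the empty list.
def Pre_check (strings : List String) : Prop := strings ≠ []
instance (strings : List String) : Decidable (Pre_check strings) := by unfold Pre_check; infer_instance
def pvWitness_check : List String := ["ab", "ab"]

def Spec_check (strings : List String) (out : Bool) : Prop := out = check_alt strings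
instance (strings : List String) (out : Bool) : Decidable (Spec_check strings out) := by unfold Spec_check; infer_instance

-- ===== CLAIM (what is proved, stated in full; the proofs are below) =====
def Claim_equal_check : Prop := ∀ (strings : List String), Dom_check strings → Pre_check strings → Spec_check strings (check strings)

-- ===== LEMMAS AND PROOFS =====

theorem checkLenLoop_eq (ll : Int) (ls : List Int) :
    checkLenLoop ll ls = ls.all (fun l => l == ll) := by
  induction ls with
  | nil => rfl
  | cons l ls ih =>
    simp [checkLenLoop, ih]
    by_cases h : ll = l <;> simp [h] <;> omega

theorem checkInner_zero (chars cs : List Char) (j : Nat) :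
    checkInner 0 chars cs j = some (chars ++ cs) := by
  induction cs generalizing chars j with
  | nil => simp [checkInner]
  | cons c cs ih => simp [checkInner, ih]

theorem checkInner_pos (i : Nat) (hi : i ≠ 0) (chars cs : List Char) (j : Nat)
    (hlen : chars.length = j + cs.length) :
    checkInner i chars cs j = if chars.drop j = cs then some chars else none := by
  induction cs generalizing j with
  | nil =>
    simp only [List.length_nil] at hlen
    have hd : chars.drop j = [] := List.drop_eq_nil_of_le (by omega)
    simp [checkInner, hd]
  | cons c cs ih =>
    have hj : j < chars.length := by simp at hlen; omega
    have hget : PySem.List.pyGetD chars (j : Int) default = chars[j] := by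
      simp [PySem.List.pyGetD_natCast, List.getD_eq_getElem?_getD, hj]
    have hdrop : chars.drop j = chars[j] :: chars.drop (j + 1) :=
      List.drop_eq_getElem_cons hj
    simp only [checkInner, if_neg hi, hget]
    by_cases hc : chars[j] = c
    · rw [if_neg (by simp [hc]), ih (j + 1) (by simp at hlen ⊢; omega), hdrop, hc]
      by_cases h2 : chars.drop (j + 1) = cs <;> simp [h2]
    · rw [if_pos (by simpa using hc)]
      have hne : ¬ chars.drop j = c :: cs := by
        rw [hdrop]; intro hcc
        injection hcc with h1 _
        exact hc h1
      rw [if_neg hne]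

theorem checkOuter_pos (chars : List Char) (i : Nat) (hi : i ≠ 0) (ss : List String)
    (hlen : ∀ s ∈ ss, s.toList.length = chars.length) :
    checkOuter chars i ss = ss.all (fun s => s.toList == chars) := by
  induction ss generalizing i with
  | nil => rfl
  | cons s ss ih =>
    have h1 : chars.length = 0 + s.toList.length := by
      have := hlen s (by simp); omega
    simp only [checkOuter, checkInner_pos i hi chars s.toList 0 h1, List.drop_zero]
    by_cases h : chars = s.toList
    · rw [if_pos h]
      show checkOuter chars (i + 1) ss = (s :: ss).all (fun t => t.toList == chars)
      rw [ih (i + 1) (by omega) (fun t ht => hlen t (by simp [ht]))]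
      simp [h]
    · rw [if_neg h]
      show false = (s :: ss).all (fun t => t.toList == chars)
      symm
      simp only [Bool.eq_false_iff, ne_eq, List.all_eq_true, not_forall]
      exact ⟨s, by simp, by simp; intro hc; exact h hc.symm⟩

theorem check_alt_cons (s0 : String) (rest : List String) :
    check_alt (s0 :: rest) = (s0 :: rest).all (fun s => s == s0) := by
  have hget : PySem.List.pyGet? (s0 :: rest) 0 = some s0 :=
    PySem.List.pyGet?_zero_cons s0 rest
  simp only [check_alt, hget]
  by_cases h : ∀ s ∈ s0 :: rest, s = s0
  · have h1 : PySem.Set.equal (PySem.Set.ofList (s0 :: rest)) (PySem.Set.ofList [s0]) = true := by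
      rw [PySem.Set.equal_iff]
      intro x
      rw [PySem.Set.mem_ofList, PySem.Set.mem_ofList, List.mem_singleton]
      constructor
      · intro hx; exact h x hx
      · intro hx; rw [hx]; exact List.mem_cons_self
    rw [h1]
    symm; simp only [List.all_eq_true]
    intro s hs; simpa using h s hs
  · push_neg at h
    obtain ⟨s, hs, hne⟩ := h
    have h1 : PySem.Set.equal (PySem.Set.ofList (s0 :: rest)) (PySem.Set.ofList [s0]) = false := by
      rw [Bool.eq_false_iff]
      intro hc
      rw [PySem.Set.equal_iff] at hc
      have := (hc s).mp (by rw [PySem.Set.mem_ofList]; exact hs)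
      rw [PySem.Set.mem_ofList, List.mem_singleton] at this
      exact hne this
    rw [h1]
    symm; simp only [Bool.eq_false_iff, ne_eq, List.all_eq_true, not_forall]
    exact ⟨s, hs, by simpa using hne⟩

-- ===== VERDICT (by name: the statement is the Claim_ definition above) =====
theorem check_spec : Claim_equal_check := by
  intro strings _ hpre
  obtain ⟨s0, rest, rfl⟩ : ∃ s0 rest, strings = s0 :: rest := by
    cases strings with
    | nil => exact absurd rfl hpre
    | cons a b => exact ⟨a, b, rfl⟩
  unfold Spec_check
  rw [check_alt_cons]
  simp only [check, List.map_cons, checkLenLoop_eq]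
  by_cases hlen : ∀ s ∈ rest, PySem.Str.len s = PySem.Str.len s0
  · have hall : (rest.map (fun s => PySem.Str.len s)).all (fun l => l == PySem.Str.len s0) = true := by
      simp only [List.all_eq_true, List.mem_map, beq_iff_eq]
      rintro l ⟨s, hs, rfl⟩; exact hlen s hs
    rw [hall, if_neg (fun hcc : true = false => Bool.noConfusion hcc)]
    have hlen' : ∀ s ∈ rest, s.toList.length = s0.toList.length := by
      intro s hs
      have := hlen s hs
      simp only [PySem.Str.len_eq] at this
      omega
    simp only [checkOuter, checkInner_zero, List.nil_append]
    rw [checkOuter_pos s0.toList 1 (by omega) rest hlen']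
    simp only [List.all_cons, beq_self_eq_true, Bool.true_and]
    exact List.all_congr rfl (fun s => by rw [Bool.eq_iff_iff]; simp [String.toList_inj])
  · push_neg at hlen
    obtain ⟨s, hs, hne⟩ := hlen
    have hall : (rest.map (fun s => PySem.Str.len s)).all (fun l => l == PySem.Str.len s0) = false := by
      rw [Bool.eq_false_iff]
      intro hc
      rw [List.all_eq_true] at hc
      exact hne (by simpa using hc _ (List.mem_map_of_mem hs))
    rw [hall, if_pos rfl]
    symm
    simp only [Bool.eq_false_iff, ne_eq, List.all_eq_true, not_forall]
    refine ⟨s, by simp [hs], ?_⟩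
    simp only [beq_iff_eq]
    intro hc
    exact hne (by rw [hc])
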